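-- pv_equiv track=rewrite | github.com/Mboget/Epreuve_pratique | script.py | indices_maxi
-- ===== SOURCE A (Python) =====
-- def indices_maxi(tableau:list[int])->(int,list[int]): # type: ignore
--     indices = []
--     maxi = tableau[0]
--
--     for i in range(len(tableau)):
--         if tableau[i] > maxi:
--             maxi = tableau[i]
--             indices.append(i)
--
--     return (maxi,indices)
-- ===== SOURCE B (Python) =====
-- def indices_maxi(tableau: list[int]) -> (int, list[int]):  # type: ignore
--     # two-pass: build the prefix-maximum table, then compare neighbours
--     run = tableau[:1]
--     for x in tableau[1:]:
--         run.append(x if x > run[-1] else run[-1])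
--     indices = [i for i in range(1, len(run)) if run[i] > run[i - 1]]
--     return (run[-1], indices)
-- ===== Notes on version B (the rewrite author's own statement) =====
-- stated objective: alternative
-- what changed: Replaced the single fused scan that updates the max and appends indices in one loop by a two-pass decomposition: first build the prefix-maximum table, then take its last entry as the max and collect the indices where adjacent table entries strictly increase.
import Mathlib
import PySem

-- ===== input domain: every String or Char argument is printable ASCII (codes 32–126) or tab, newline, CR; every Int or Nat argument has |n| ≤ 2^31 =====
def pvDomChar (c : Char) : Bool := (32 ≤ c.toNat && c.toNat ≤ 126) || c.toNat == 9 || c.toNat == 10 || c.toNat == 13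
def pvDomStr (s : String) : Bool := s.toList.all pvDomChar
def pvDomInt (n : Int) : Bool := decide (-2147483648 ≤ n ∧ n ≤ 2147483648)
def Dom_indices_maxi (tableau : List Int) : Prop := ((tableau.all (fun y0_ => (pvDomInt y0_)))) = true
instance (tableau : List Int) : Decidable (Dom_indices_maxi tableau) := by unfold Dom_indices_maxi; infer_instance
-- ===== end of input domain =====

-- B replaces A's fused scan by a prefix-maximum table plus a neighbour-comparison pass (alternative decomposition, same cost; return value only).

-- ===== PORT A =====
def indices_maxi (tableau : List Int) : Int × List Int :=
  let indices : List Int := []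
  let maxi : Int := PySem.List.pyGetD tableau 0 0
  let st :=
    (PySem.List.pyRange 0 tableau.length 1).foldl
      (fun (st : Int × List Int) (i : Int) =>
        if PySem.List.pyGetD tableau i 0 > st.1 then
          (PySem.List.pyGetD tableau i 0, st.2 ++ [i])
        else st)
      (maxi, indices)
  (st.1, st.2)

-- ===== PORT B =====
def indices_maxi_alt (tableau : List Int) : Int × List Int :=
  let run0 := PySem.List.slice tableau none (some 1)
  let run :=
    (PySem.List.slice tableau (some 1) none).foldl
      (fun (run : List Int) (x : Int) =>
        run ++ [if x > PySem.List.pyGetD run (-1) 0 then x else PySem.List.pyGetD run (-1) 0])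
      run0
  let indices :=
    (PySem.List.pyRange 1 run.length 1).filter
      (fun i => PySem.List.pyGetD run i 0 > PySem.List.pyGetD run (i - 1) 0)
  (PySem.List.pyGetD run (-1) 0, indices)

-- ===== PRECONDITION & SPEC =====
-- A raises IndexError on the empty list (tableau[0]); B raises there too (run[-1]).
def Pre_indices_maxi (tableau : List Int) : Prop := tableau ≠ []
instance (tableau : List Int) : Decidable (Pre_indices_maxi tableau) := by unfold Pre_indices_maxi; infer_instance
def pvWitness_indices_maxi : List Int := [3, 1, 4, 1, 5]

def Spec_indices_maxi (tableau : List Int) (out : Int × List Int) : Prop := out = indices_maxi_alt tableau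
instance (tableau : List Int) (out : Int × List Int) : Decidable (Spec_indices_maxi tableau out) := by unfold Spec_indices_maxi; infer_instance

-- ===== CLAIM (what is proved, stated in full; the proofs are below) =====
def Claim_equal_indices_maxi : Prop := ∀ (tableau : List Int), Dom_indices_maxi tableau → Pre_indices_maxi tableau → Spec_indices_maxi tableau (indices_maxi tableau)

-- ===== LEMMAS AND PROOFS =====

-- reference recursion: current max m, next index i, remaining suffix
def pvGo (m : Int) (i : Int) : List Int → Int × List Int
  | [] => (m, [])
  | x :: xs =>
    if x > m then
      let r := pvGo x (i + 1) xs
      (r.1, i :: r.2)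
    else pvGo m (i + 1) xs

-- prefix-maximum table starting from m
def pvRun (m : Int) : List Int → List Int
  | [] => [m]
  | x :: xs => m :: pvRun (if x > m then x else m) xs

theorem pvRun_ne_nil (m : Int) (xs : List Int) : pvRun m xs ≠ [] := by
  cases xs <;> simp [pvRun]

theorem pvRun_length (m : Int) (xs : List Int) : (pvRun m xs).length = xs.length + 1 := by
  induction xs generalizing m with
  | nil => simp [pvRun]
  | cons x xs ih => simp [pvRun, ih]

theorem pvRun_head (m : Int) (xs : List Int) : ∃ r, pvRun m xs = m :: r := by
  cases xs <;> exact ⟨_, rfl⟩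

theorem pvRun_getLast (m : Int) (xs : List Int) (i : Int) :
    (pvRun m xs).getLast (pvRun_ne_nil m xs) = (pvGo m i xs).1 := by
  induction xs generalizing m i with
  | nil => simp [pvRun, pvGo]
  | cons x xs ih =>
    simp only [pvRun, pvGo]
    rw [List.getLast_cons (pvRun_ne_nil _ xs)]
    by_cases h : x > m
    · simp only [h, if_pos]
      exact ih x (i + 1)
    · simp only [if_neg h]
      exact ih m (i + 1)

-- A's loop, generalized over a scanned prefix
theorem pvFoldA (xs : List Int) : ∀ (pre : List Int) (m : Int) (acc : List Int),
    (PySem.List.pyRange pre.length (pre.length + xs.length) 1).foldl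
      (fun (st : Int × List Int) (i : Int) =>
        if PySem.List.pyGetD (pre ++ xs) i 0 > st.1 then
          (PySem.List.pyGetD (pre ++ xs) i 0, st.2 ++ [i])
        else st)
      (m, acc)
    = ((pvGo m pre.length xs).1, acc ++ (pvGo m pre.length xs).2) := by
  induction xs with
  | nil =>
    intro pre m acc
    rw [PySem.List.pyRange_one_eq_nil (by simp)]
    simp [pvGo]
  | cons x xs ih =>
    intro pre m acc
    rw [PySem.List.pyRange_one_cons (by simp only [List.length_cons]; push_cast; omega)]
    simp only [List.foldl_cons]
    have hget : PySem.List.pyGetD (pre ++ x :: xs) (pre.length : Int) 0 = x := by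
      simp only [PySem.List.pyGetD]
      rw [PySem.List.pyGet?_append_length]
      rfl
    rw [hget]
    have hlist : pre ++ x :: xs = (pre ++ [x]) ++ xs := by simp
    have hlen : ((pre.length : Int) + 1) = ((pre ++ [x]).length : Int) := by simp
    have hend : (pre.length : Int) + (x :: xs).length = ((pre ++ [x]).length : Int) + xs.length := by
      simp only [List.length_cons, List.length_append, List.length_nil]
      push_cast; omega
    by_cases h : x > m
    · rw [if_pos h, hlist, hend, hlen, ih (pre ++ [x]) x (acc ++ [(pre.length : Int)])]
      simp only [pvGo, if_pos h, ← hlen]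
      simp
    · rw [if_neg h, hlist, hend, hlen, ih (pre ++ [x]) m acc]
      simp only [pvGo, if_neg h, ← hlen]

theorem pvA_eq (h : Int) (tl : List Int) :
    indices_maxi (h :: tl) = pvGo h 1 tl := by
  unfold indices_maxi
  have h0 : PySem.List.pyGetD (h :: tl) 0 0 = h := PySem.List.pyGetD_zero_cons _ _ _
  have hfold := pvFoldA (h :: tl) [] h []
  simp only [List.nil_append, List.length_nil, Nat.cast_zero, zero_add] at hfold
  simp only [h0, hfold]
  simp only [pvGo, if_neg (lt_irrefl h)]
  simp

-- B's run-building loop, generalized: folding xs onto pre ++ [m] yields pre ++ pvRun m xs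
theorem pvFoldB (xs : List Int) : ∀ (pre : List Int) (m : Int),
    xs.foldl
      (fun (run : List Int) (x : Int) =>
        run ++ [if x > PySem.List.pyGetD run (-1) 0 then x else PySem.List.pyGetD run (-1) 0])
      (pre ++ [m])
    = pre ++ pvRun m xs := by
  induction xs with
  | nil => intro pre m; simp [pvRun]
  | cons x xs ih =>
    intro pre m
    simp only [List.foldl_cons]
    rw [PySem.List.pyGetD_neg_one_append_singleton]
    rw [show (pre ++ [m]) ++ [if x > m then x else m] = (pre ++ [m]) ++ [if x > m then x else m] from rfl]
    rw [ih (pre ++ [m]) (if x > m then x else m)]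
    simp [pvRun]

-- B's comparison pass, generalized over a prefix of the run table
theorem pvFiltB (xs : List Int) : ∀ (pre : List Int) (m : Int),
    (PySem.List.pyRange ((pre.length : Int) + 1) ((pre.length : Int) + 1 + xs.length) 1).filter
      (fun i => PySem.List.pyGetD (pre ++ pvRun m xs) i 0 > PySem.List.pyGetD (pre ++ pvRun m xs) (i - 1) 0)
    = (pvGo m ((pre.length : Int) + 1) xs).2 := by
  induction xs with
  | nil =>
    intro pre m
    rw [PySem.List.pyRange_one_eq_nil (by simp)]
    simp [pvGo]
  | cons x xs ih =>
    intro pre m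
    rw [PySem.List.pyRange_one_cons (by simp only [List.length_cons]; push_cast; omega)]
    simp only [List.filter_cons]
    set m' := if x > m then x else m with hm'
    have hsplit : pre ++ pvRun m (x :: xs) = (pre ++ [m]) ++ pvRun m' xs := by
      simp [pvRun, hm']
    have hL : ((pre.length : Int) + 1) = (((pre ++ [m]).length : Int)) := by simp
    obtain ⟨r, hr⟩ := pvRun_head m' xs
    have hgi : PySem.List.pyGetD (pre ++ pvRun m (x :: xs)) ((pre.length : Int) + 1) 0 = m' := by
      rw [hsplit, hr, hL]
      simp only [PySem.List.pyGetD]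
      rw [PySem.List.pyGet?_append_length]
      rfl
    have hgi1 : PySem.List.pyGetD (pre ++ pvRun m (x :: xs)) ((pre.length : Int) + 1 - 1) 0 = m := by
      simp only [add_sub_cancel_right]
      have hr1 : pvRun m (x :: xs) = m :: pvRun m' xs := rfl
      rw [hr1]
      simp only [PySem.List.pyGetD]
      rw [PySem.List.pyGet?_append_length]
      rfl
    rw [hgi, hgi1]
    have hend : (pre.length : Int) + 1 + (x :: xs).length = ((pre ++ [m]).length : Int) + 1 + xs.length := by
      simp only [List.length_cons, List.length_append, List.length_nil]
      push_cast; omega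
    have hrest :
        (PySem.List.pyRange ((pre.length : Int) + 1 + 1) ((pre.length : Int) + 1 + (x :: xs).length) 1).filter
          (fun i => PySem.List.pyGetD (pre ++ pvRun m (x :: xs)) i 0 > PySem.List.pyGetD (pre ++ pvRun m (x :: xs)) (i - 1) 0)
        = (pvGo m' (((pre ++ [m]).length : Int) + 1) xs).2 := by
      rw [hend, hsplit, hL]
      exact ih (pre ++ [m]) m'
    by_cases h : x > m
    · rw [if_pos (by simp [hm', h]), hrest]
      simp only [pvGo, if_pos h, hm']
      rw [← hL]
    · rw [if_neg (by simp [hm', h]), hrest]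
      simp only [pvGo, if_neg h, hm']
      rw [← hL]

theorem pvB_eq (h : Int) (tl : List Int) :
    indices_maxi_alt (h :: tl) = pvGo h 1 tl := by
  have hs1 : PySem.List.slice (h :: tl) none (some 1) = [h] := by
    rw [PySem.List.slice_to (h :: tl) (by norm_num)]
    rfl
  have hs2 : PySem.List.slice (h :: tl) (some 1) none = tl := by
    rw [PySem.List.slice_from_one]
    rfl
  have hrun := pvFoldB tl [] h
  simp only [List.nil_append] at hrun
  have hlast : PySem.List.pyGetD (pvRun h tl) (-1) 0 = (pvGo h 1 tl).1 := by
    rw [PySem.List.pyGetD_neg_one (pvRun h tl) 0 (pvRun_ne_nil h tl)]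
    exact pvRun_getLast h tl 1
  have hfilt :
      (PySem.List.pyRange 1 ((pvRun h tl).length : Int) 1).filter
        (fun i => PySem.List.pyGetD (pvRun h tl) i 0 > PySem.List.pyGetD (pvRun h tl) (i - 1) 0)
      = (pvGo h 1 tl).2 := by
    have hf := pvFiltB tl [] h
    simp only [List.nil_append, List.length_nil, Nat.cast_zero, zero_add] at hf
    rw [pvRun_length, show ((tl.length + 1 : Nat) : Int) = 1 + (tl.length : Int) by push_cast; ring]
    exact hf
  unfold indices_maxi_alt
  simp only [hs1, hs2, hrun, hlast, hfilt]

-- ===== VERDICT (by name: the statement is the Claim_ definition above) =====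
theorem indices_maxi_spec : Claim_equal_indices_maxi := by
  unfold Claim_equal_indices_maxi
  intro tableau _ hpre
  unfold Spec_indices_maxi
  cases tableau with
  | nil => exact absurd rfl hpre
  | cons h tl => rw [pvA_eq, pvB_eq]
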